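-- pv_equiv track=rewrite | github.com/agluszak/imperialism-decomp | new_scripts/run_global_dehardcode_wave.py | contiguous_clusters
-- ===== SOURCE A (Python) =====
-- from typing import Iterable
--
-- def contiguous_clusters(addrs: Iterable[int], stride: int, min_len: int) -> set[int]:
--     sorted_addrs = sorted(set(addrs))
--     in_cluster: set[int] = set()
--     if not sorted_addrs:
--         return in_cluster
--     run = [sorted_addrs[0]]
--     for a in sorted_addrs[1:]:
--         if a - run[-1] == stride:
--             run.append(a)
--             continue
--         if len(run) >= min_len:
--             in_cluster.update(run)
--         run = [a]
--     if len(run) >= min_len: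
--         in_cluster.update(run)
--     return in_cluster
-- ===== SOURCE B (Python) =====
-- def contiguous_clusters(addrs, stride, min_len):
--     s = sorted(set(addrs))
--     n = len(s)
--     bounds = [0] + [i for i in range(1, n) if s[i] - s[i - 1] != stride] + [n]
--     out = set()
--     for b, e in zip(bounds, bounds[1:]):
--         if e - b >= min_len:
--             out.update(s[b:e])
--     return out
-- ===== Notes on version B (the rewrite author's own statement) =====
-- stated objective: alternative
-- what changed: B replaces A's incremental run-accumulator loop (grow a run, flush it at each break and at the end) by a two-phase boundary decomposition: one comprehension collects the break indices of the sorted distinct list, then the slices between consecutive boundaries whose length reaches min_len are unioned into the result.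
import Mathlib
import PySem

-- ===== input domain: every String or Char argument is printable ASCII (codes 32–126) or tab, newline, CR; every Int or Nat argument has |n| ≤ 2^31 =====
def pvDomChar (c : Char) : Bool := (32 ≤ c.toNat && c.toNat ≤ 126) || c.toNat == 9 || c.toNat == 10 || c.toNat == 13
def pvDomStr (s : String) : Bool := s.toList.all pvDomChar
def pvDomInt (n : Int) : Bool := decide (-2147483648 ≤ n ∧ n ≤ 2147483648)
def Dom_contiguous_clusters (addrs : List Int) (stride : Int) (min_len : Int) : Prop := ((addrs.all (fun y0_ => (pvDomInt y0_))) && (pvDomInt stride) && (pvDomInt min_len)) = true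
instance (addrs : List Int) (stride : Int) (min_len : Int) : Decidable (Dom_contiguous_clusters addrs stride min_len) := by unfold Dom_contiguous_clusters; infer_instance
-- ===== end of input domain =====

-- B replaces A's incremental run accumulator by boundary indices plus slicing (alternative decomposition, same cost).

-- ===== PORT A =====
-- the body of A's for-loop: state = (in_cluster, run); run is never empty, so run[-1] is read at index -1
def pvAStep (stride min_len : Int) (st : PySem.Set Int × List Int) (a : Int) : PySem.Set Int × List Int :=
  if a - PySem.List.pyGetD st.2 (-1) 0 = stride then (st.1, st.2 ++ [a])
  else if min_len ≤ (st.2.length : Int) then (PySem.Set.update st.1 st.2, [a])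
  else (st.1, [a])

def contiguous_clusters (addrs : List Int) (stride : Int) (min_len : Int) : List Int :=
  let sorted_addrs := PySem.List.sorted (PySem.Set.ofList addrs) (fun x => x) false
  match sorted_addrs with
  | [] => (PySem.Set.empty : PySem.Set Int)
  | a0 :: rest =>
    let st := rest.foldl (pvAStep stride min_len) ((PySem.Set.empty : PySem.Set Int), [a0])
    if min_len ≤ (st.2.length : Int) then PySem.Set.update st.1 st.2 else st.1

-- ===== PORT B =====
-- boundary test of B's comprehension: s[i] - s[i - 1] != stride
def pvBPred (s : List Int) (stride : Int) (i : Int) : Bool :=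
  decide (PySem.List.pyGetD s i 0 - PySem.List.pyGetD s (i - 1) 0 ≠ stride)

-- the body of B's for-loop over zip(bounds, bounds[1:]): out.update(s[b:e]) when e - b >= min_len
def pvBStep (s : List Int) (min_len : Int) (out : PySem.Set Int) (p : Int × Int) : PySem.Set Int :=
  if min_len ≤ p.2 - p.1 then PySem.Set.update out (PySem.List.slice s (some p.1) (some p.2)) else out

def contiguous_clusters_alt (addrs : List Int) (stride : Int) (min_len : Int) : List Int :=
  let s := PySem.List.sorted (PySem.Set.ofList addrs) (fun x => x) false
  let n : Int := (s.length : Int)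
  let bounds := [(0 : Int)] ++ (PySem.List.pyRange 1 n 1).filter (pvBPred s stride) ++ [n]
  (bounds.zip (PySem.List.slice bounds (some 1) none)).foldl (pvBStep s min_len)
    (PySem.Set.empty : PySem.Set Int)

-- ===== PRECONDITION & SPEC =====
def Spec_contiguous_clusters (addrs : List Int) (stride : Int) (min_len : Int) (out : List Int) : Prop := out = contiguous_clusters_alt addrs stride min_len
instance (addrs : List Int) (stride : Int) (min_len : Int) (out : List Int) : Decidable (Spec_contiguous_clusters addrs stride min_len out) := by unfold Spec_contiguous_clusters; infer_instance

-- ===== CLAIM (what is proved, stated in full; the proofs are below) =====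
def Claim_equal_contiguous_clusters : Prop := ∀ (addrs : List Int) (stride : Int) (min_len : Int), Dom_contiguous_clusters addrs stride min_len → Spec_contiguous_clusters addrs stride min_len (contiguous_clusters addrs stride min_len)

-- ===== LEMMAS AND PROOFS =====

-- the maximal stride-runs of a list, given the current run (nonempty) and its last element
def pvRuns (stride : Int) (run : List Int) (last : Int) : List Int → List (List Int)
  | [] => [run]
  | a :: t => if a - last = stride then pvRuns stride (run ++ [a]) a t else run :: pvRuns stride [a] a t

-- flushing one (qualifying) run into the result set
def pvUpd (min_len : Int) (s : PySem.Set Int) (r : List Int) : PySem.Set Int :=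
  if min_len ≤ (r.length : Int) then PySem.Set.update s r else s

-- cumulative boundary positions of a run list, starting at position k
def pvCuts (k : Int) : List (List Int) → List Int
  | [] => [k]
  | r :: rs => k :: pvCuts (k + (r.length : Int)) rs

-- interior boundary positions (the cuts without the outer 0 and n)
def pvInner (k : Int) : List (List Int) → List Int
  | [] => []
  | [_] => []
  | r :: rs => (k + (r.length : Int)) :: pvInner (k + (r.length : Int)) rs

theorem pvRuns_flatten (stride : Int) (t : List Int) : ∀ (run : List Int) (last : Int),
    (pvRuns stride run last t).flatten = run ++ t := by
  induction t with
  | nil => intro run last; simp [pvRuns]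
  | cons a t ih =>
    intro run last
    simp only [pvRuns]
    split
    · rw [ih]; simp
    · simp [List.flatten, ih]

theorem pvRuns_ne_nil (stride : Int) (t : List Int) : ∀ (run : List Int) (last : Int),
    pvRuns stride run last t ≠ [] := by
  induction t with
  | nil => intro run last; simp [pvRuns]
  | cons a t ih => intro run last; simp only [pvRuns]; split <;> simp [ih]

theorem pvRuns_head (stride : Int) (t : List Int) : ∀ (run : List Int) (last : Int) (y : List Int),
    run ≠ [] → y ∈ (pvRuns stride run last t).head? → y.head! = run.head! := by
  induction t with
  | nil => intro run last y _ hy; simp [pvRuns] at hy; simp [hy]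
  | cons a t ih =>
    intro run last y h hy
    simp only [pvRuns] at hy
    split at hy
    · have := ih (run ++ [a]) a y (by simp) hy
      rw [this]
      cases run with
      | nil => exact absurd rfl h
      | cons b bs => simp [List.head!]
    · simp at hy; simp [hy]

theorem pvRuns_ok (stride : Int) (t : List Int) : ∀ (run : List Int) (last : Int),
    run ≠ [] → run.getLast? = some last → run.IsChain (fun x y => y - x = stride) →
    (∀ r ∈ pvRuns stride run last t, r ≠ [] ∧ r.IsChain (fun x y => y - x = stride)) ∧
    (pvRuns stride run last t).IsChain (fun r r' => r'.head! - r.getLast! ≠ stride) := by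
  induction t with
  | nil =>
    intro run last h hl hc
    exact ⟨by intro r hr; simp [pvRuns] at hr; exact hr ▸ ⟨h, hc⟩, by simp [pvRuns]⟩
  | cons a t ih =>
    intro run last h hl hc
    simp only [pvRuns]
    by_cases hcond : a - last = stride
    · rw [if_pos hcond]
      refine ih (run ++ [a]) a (by simp) (by simp) ?_
      refine List.isChain_append.mpr ⟨hc, by simp, ?_⟩
      intro x hx y hy
      simp at hy
      rw [hl] at hx
      simp at hx
      subst hx; subst hy
      exact hcond
    · rw [if_neg hcond]
      obtain ⟨h1, h2⟩ := ih [a] a (by simp) (by simp) (by simp)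
      refine ⟨?_, ?_⟩
      · intro r hr
        rcases List.mem_cons.mp hr with hr | hr
        · exact hr ▸ ⟨h, hc⟩
        · exact h1 r hr
      · refine List.IsChain.cons h2 ?_
        intro y hy
        have hha : y.head! = a := by
          have := pvRuns_head stride t [a] a y (by simp) hy
          simpa using this
        rw [hha, List.getLast!_of_getLast? hl]
        exact hcond

theorem pvA_loop (stride min_len : Int) (t : List Int) : ∀ (run : List Int) (last : Int) (ic : PySem.Set Int),
    run ≠ [] → run.getLast? = some last →
    (let st := t.foldl (pvAStep stride min_len) (ic, run);
     if min_len ≤ (st.2.length : Int) then PySem.Set.update st.1 st.2 else st.1)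
    = (pvRuns stride run last t).foldl (pvUpd min_len) ic := by
  induction t with
  | nil =>
    intro run last ic h hl
    simp [pvRuns, pvUpd]
  | cons a t ih =>
    intro run last ic h hl
    have hlast : PySem.List.pyGetD run (-1) 0 = last := by
      rw [PySem.List.pyGetD_neg_one (h := h)]
      rw [List.getLast?_eq_some_getLast (h := h)] at hl
      exact (Option.some.injEq _ _).mp hl
    simp only [List.foldl_cons, pvRuns]
    by_cases hc : a - last = stride
    · rw [if_pos hc]
      have hstep : pvAStep stride min_len (ic, run) a = (ic, run ++ [a]) := by
        simp [pvAStep, hlast, hc]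
      rw [hstep]
      exact ih (run ++ [a]) a ic (by simp) (by simp)
    · rw [if_neg hc]
      have hstep : pvAStep stride min_len (ic, run) a = (pvUpd min_len ic run, [a]) := by
        simp only [pvAStep, hlast, pvUpd]
        rw [if_neg hc]
        split <;> rfl
      rw [hstep, List.foldl_cons]
      exact ih [a] a (pvUpd min_len ic run) (by simp) (by simp)

theorem pvGet_shift (pre u : List Int) (i : Int) (h1 : (pre.length : Int) ≤ i)
    (h2 : i < ((pre ++ u).length : Int)) :
    PySem.List.pyGetD (pre ++ u) i 0 = PySem.List.pyGetD u (i - (pre.length : Int)) 0 := by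
  have hl : ((pre ++ u).length : Int) = (pre.length : Int) + (u.length : Int) := by
    simp
  rw [PySem.List.pyGetD_eq_getElem _ 0 (by omega) h2,
      PySem.List.pyGetD_eq_getElem _ 0 (by omega) (by omega)]
  rw [List.getElem_append_right (by omega)]
  congr 1
  omega

theorem pvFilt_eq (stride : Int) (rs : List (List Int)) : ∀ (pre : List Int),
    (∀ r ∈ rs, r ≠ [] ∧ r.IsChain (fun x y => y - x = stride)) →
    rs.IsChain (fun r r' => r'.head! - r.getLast! ≠ stride) →
    (PySem.List.pyRange ((pre.length : Int) + 1) (((pre ++ rs.flatten).length : Int)) 1).filter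
        (pvBPred (pre ++ rs.flatten) stride)
    = pvInner (pre.length : Int) rs := by
  induction rs with
  | nil =>
    intro pre _ _
    rw [PySem.List.pyRange_one_eq_nil (by simp)]
    rfl
  | cons r rs ih =>
    intro pre hruns hjun
    obtain ⟨hrne, hrchain⟩ := hruns r (by simp)
    have hrlen : 1 ≤ (r.length : Int) := by
      have := List.length_pos_iff.mpr hrne; omega
    have hlenfull : (((pre ++ (r :: rs).flatten).length : Nat) : Int)
        = (pre.length : Int) + (r.length : Int) + (rs.flatten.length : Int) := by simp; ring
    have hflat : (r :: rs).flatten = r ++ rs.flatten := by simp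
    have hflen : ((r :: rs).flatten.length : Int) = (r.length : Int) + (rs.flatten.length : Int) := by
      rw [hflat]; simp
    -- split the index range at the end of the first run
    rw [PySem.List.pyRange_one_append ((pre.length : Int) + 1)
          ((pre.length : Int) + (r.length : Int)) _ (by omega) (by omega)]
    rw [List.filter_append]
    -- indices strictly inside the first run are not boundaries
    have hpart1 : (PySem.List.pyRange ((pre.length : Int) + 1)
          ((pre.length : Int) + (r.length : Int)) 1).filter (pvBPred (pre ++ (r :: rs).flatten) stride) = [] := by
      rw [List.filter_eq_nil_iff]
      intro i hi
      rw [PySem.List.mem_pyRange_one] at hi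
      simp only [pvBPred, decide_eq_true_eq, not_not]
      rw [pvGet_shift _ _ _ (by omega) (by omega),
          pvGet_shift _ _ _ (by omega) (by omega)]
      set j : Int := i - (pre.length : Int) with hj
      have hj1 : 1 ≤ j := by omega
      have hj2 : j < (r.length : Int) := by omega
      have g1 : PySem.List.pyGetD ((r :: rs).flatten) j 0 = r[j.toNat] := by
        rw [hflat, PySem.List.pyGetD_eq_getElem _ 0 (by omega) (by rw [← hflat]; omega)]
        rw [List.getElem_append_left (by omega)]
      have g2 : PySem.List.pyGetD ((r :: rs).flatten) (i - 1 - (pre.length : Int)) 0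
          = r[j.toNat - 1] := by
        rw [hflat, PySem.List.pyGetD_eq_getElem _ 0 (by omega) (by rw [← hflat]; omega)]
        rw [List.getElem_append_left (by omega)]
        congr 1
        omega
      rw [g1, g2]
      have hchain := List.isChain_iff_getElem.mp hrchain (j.toNat - 1) (by omega)
      simp only [show j.toNat - 1 + 1 = j.toNat from by omega] at hchain
      omega
    rw [hpart1, List.nil_append]
    cases rs with
    | nil =>
      rw [show (((pre ++ [r].flatten).length : Nat) : Int) = (pre.length : Int) + (r.length : Int) from by simp]
      rw [PySem.List.pyRange_one_eq_nil (by omega)]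
      rfl
    | cons r1 rs' =>
      obtain ⟨hr1ne, _⟩ := hruns r1 (by simp)
      have hr1len : 1 ≤ (r1.length : Int) := by
        have := List.length_pos_iff.mpr hr1ne; omega
      have hflat1 : (r1 :: rs').flatten = r1 ++ rs'.flatten := by simp
      have hflen1 : ((r1 :: rs').flatten.length : Int) = (r1.length : Int) + (rs'.flatten.length : Int) := by
        rw [hflat1]; simp
      rw [PySem.List.pyRange_one_cons (by rw [hlenfull]; omega)]
      rw [List.filter_cons]
      have hbnd : pvBPred (pre ++ (r :: r1 :: rs').flatten) stride
          ((pre.length : Int) + (r.length : Int)) = true := by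
        simp only [pvBPred, decide_eq_true_eq]
        have e1 : PySem.List.pyGetD (pre ++ (r :: r1 :: rs').flatten) ((pre.length : Int) + (r.length : Int)) 0
            = PySem.List.pyGetD ((r :: r1 :: rs').flatten) ((r.length : Int)) 0 := by
          have := pvGet_shift pre ((r :: r1 :: rs').flatten) ((pre.length : Int) + (r.length : Int))
            (by omega) (by rw [hlenfull]; omega)
          simpa using this
        have e2 : PySem.List.pyGetD (pre ++ (r :: r1 :: rs').flatten) ((pre.length : Int) + (r.length : Int) - 1) 0
            = PySem.List.pyGetD ((r :: r1 :: rs').flatten) ((r.length : Int) - 1) 0 := by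
          have := pvGet_shift pre ((r :: r1 :: rs').flatten) ((pre.length : Int) + (r.length : Int) - 1)
            (by omega) (by rw [hlenfull]; omega)
          rw [this]; congr 1; omega
        rw [e1, e2]
        have hflat2 : (r :: r1 :: rs').flatten = r ++ (r1 ++ rs'.flatten) := by simp
        have hflen2 : ((r :: r1 :: rs').flatten.length : Int)
            = (r.length : Int) + (r1.length : Int) + (rs'.flatten.length : Int) := by
          rw [hflat2]; simp; ring
        have g1 : PySem.List.pyGetD ((r :: r1 :: rs').flatten) ((r.length : Int)) 0 = r1.head! := by
          rw [hflat2, PySem.List.pyGetD_eq_getElem _ 0 (by omega) (by rw [← hflat2]; omega)]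
          rw [List.getElem_append_right (by omega)]
          rw [List.getElem_append_left (by omega)]
          cases r1 with
          | nil => exact absurd rfl hr1ne
          | cons b bs =>
            simp [List.head!]
        have g2 : PySem.List.pyGetD ((r :: r1 :: rs').flatten) ((r.length : Int) - 1) 0 = r.getLast! := by
          rw [hflat2, PySem.List.pyGetD_eq_getElem _ 0 (by omega) (by rw [← hflat2]; omega)]
          rw [List.getElem_append_left (by omega)]
          have hsome : r.getLast? = some r[r.length - 1] := by
            rw [List.getLast?_eq_getElem?, List.getElem?_eq_getElem (by omega)]
          rw [List.getLast!_of_getLast? hsome]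
          congr 1
          omega
        rw [g1, g2]
        exact (List.isChain_cons_cons.mp hjun).1
      rw [hbnd]
      have hjun' := (List.isChain_cons_cons.mp hjun).2
      have ihres := ih (pre ++ r) (by intro r' hr'; exact hruns r' (by simp [hr'])) hjun'
      rw [show ((((pre ++ r).length : Nat) : Int)) = (pre.length : Int) + (r.length : Int) from by simp] at ihres
      rw [show ((pre ++ r) ++ (r1 :: rs').flatten) = pre ++ (r :: r1 :: rs').flatten from by simp] at ihres
      simp only [if_true]
      rw [show (((pre ++ (r :: r1 :: rs').flatten).length : Nat) : Int)
          = ((((pre ++ r) ++ (r1 :: rs').flatten).length : Nat) : Int) from by simp] at ihres ⊢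
      rw [ihres]
      rfl

theorem pvCuts_decomp (rs : List (List Int)) : ∀ (k : Int), rs ≠ [] →
    pvCuts k rs = k :: (pvInner k rs ++ [k + (rs.flatten.length : Int)]) := by
  induction rs with
  | nil => simp
  | cons r rs ih =>
    intro k _
    cases rs with
    | nil => simp [pvCuts, pvInner]
    | cons r' rs' =>
      rw [show pvCuts k (r :: r' :: rs') = k :: pvCuts (k + (r.length : Int)) (r' :: rs') from rfl,
        ih _ (by simp)]
      simp only [pvInner, List.flatten_cons, List.length_append, List.cons_append]
      push_cast
      ring_nf

theorem pvCuts_head (rs : List (List Int)) (k : Int) : pvCuts k rs = k :: (pvCuts k rs).tail := by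
  cases rs <;> rfl

theorem pvZipFold (min_len : Int) (rs : List (List Int)) : ∀ (pre : List Int) (out : PySem.Set Int),
    ((pvCuts (pre.length : Int) rs).zip ((pvCuts (pre.length : Int) rs).tail)).foldl
        (pvBStep (pre ++ rs.flatten) min_len) out
    = rs.foldl (pvUpd min_len) out := by
  induction rs with
  | nil => intro pre out; simp [pvCuts]
  | cons r rs ih =>
    intro pre out
    rw [show pvCuts (pre.length : Int) (r :: rs)
        = (pre.length : Int) :: pvCuts ((pre.length : Int) + (r.length : Int)) rs from rfl]
    rw [pvCuts_head rs ((pre.length : Int) + (r.length : Int))]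
    simp only [List.tail_cons, List.zip_cons_cons, List.foldl_cons]
    have hstep : pvBStep (pre ++ (r :: rs).flatten) min_len out
        (((pre.length : Int)), ((pre.length : Int) + (r.length : Int))) = pvUpd min_len out r := by
      simp only [pvBStep, pvUpd]
      have h1 : ((pre.length : Int) + (r.length : Int)) - (pre.length : Int) = (r.length : Int) := by ring
      rw [h1]
      have h2 : PySem.List.slice (pre ++ (r :: rs).flatten) (some (pre.length : Int))
          (some ((pre.length : Int) + (r.length : Int))) = r := by
        rw [PySem.List.slice_natCast_add]
        rw [List.flatten_cons, ← List.append_assoc]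
        rw [show pre ++ r ++ rs.flatten = pre ++ (r ++ rs.flatten) from by simp]
        rw [List.drop_left, List.take_left]
      rw [h2]
    rw [hstep]
    have hcast : ((pre.length : Int) + (r.length : Int)) = (((pre ++ r).length : Nat) : Int) := by
      simp
    have hfull : pre ++ (r :: rs).flatten = (pre ++ r) ++ rs.flatten := by simp
    rw [hcast, hfull, ← pvCuts_head]
    exact ih (pre ++ r) (pvUpd min_len out r)

-- ===== VERDICT (by name: the statement is the Claim_ definition above) =====
theorem contiguous_clusters_spec : Claim_equal_contiguous_clusters := by
  intro addrs stride min_len _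
  unfold Spec_contiguous_clusters contiguous_clusters contiguous_clusters_alt
  dsimp only
  cases hl : PySem.List.sorted (PySem.Set.ofList addrs) (fun x => x) false with
  | nil =>
    dsimp only
    rw [PySem.List.pyRange_one_eq_nil (by simp)]
    simp only [List.filter_nil, List.length_nil, Nat.cast_zero]
    rw [PySem.List.slice_from_one]
    show PySem.Set.empty = if min_len ≤ (0 : Int) - 0 then
        PySem.Set.update PySem.Set.empty (PySem.List.slice ([] : List Int) (some 0) (some 0))
      else PySem.Set.empty
    split
    · rfl
    · rfl
  | cons a0 rest =>
    dsimp only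
    set rs := pvRuns stride [a0] a0 rest with hrs
    have hne : rs ≠ [] := pvRuns_ne_nil stride rest [a0] a0
    have hfl : rs.flatten = a0 :: rest := by
      rw [hrs, pvRuns_flatten]; rfl
    obtain ⟨hok1, hok2⟩ := pvRuns_ok stride rest [a0] a0 (by simp) (by simp) (by simp)
    -- A's loop flushes exactly the runs
    rw [pvA_loop stride min_len rest [a0] a0 _ (by simp) (by simp)]
    -- B's boundary comprehension computes the interior cut positions
    have hfilt := pvFilt_eq stride rs [] hok1 hok2
    simp only [List.nil_append, List.length_nil, Nat.cast_zero, Int.zero_add, hfl] at hfilt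
    rw [hfilt]
    -- B's bounds list is the full cut list
    have hcuts := pvCuts_decomp rs 0 hne
    rw [hfl] at hcuts
    rw [show [(0 : Int)] ++ pvInner 0 rs ++ [((a0 :: rest).length : Int)]
        = 0 :: (pvInner 0 rs ++ [0 + ((a0 :: rest).length : Int)]) from by simp, ← hcuts]
    rw [PySem.List.slice_from_one]
    -- B's zip loop flushes the same runs
    have hzip := pvZipFold min_len rs [] PySem.Set.empty
    simp only [List.nil_append, List.length_nil, Nat.cast_zero, hfl] at hzip
    rw [hzip]
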